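-- pv_equiv track=rewrite | github.com/syedaareebashah/To-do-webapp | src/formatters/basic_response_formatter.py | format_task_summary
-- ===== SOURCE A (Python) =====
-- def format_task_summary(tasks: list) -> str:
--     """
--     Format a summary of tasks.
--
--     Args:
--         tasks (list): List of task dictionaries
--
--     Returns:
--         str: The formatted task summary
--     """
--     if not tasks:
--         return "You don't have any tasks."
--
--     total = len(tasks)
--     completed = len([task for task in tasks if task.get('status') == 'completed'])
--     pending = total - completed
--
--     summary = f"You have {total} tasks in total: {pending} pending and {completed} completed."
--
--     if pending > 0:
--         # Show first few pending tasks
--         pending_tasks = [t for t in tasks if t.get('status') == 'pending'][:3]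
--         if pending_tasks:
--             task_list = ", ".join([f"'{t.get('content', 'unnamed')}'" for t in pending_tasks])
--             summary += f"\nPending: {task_list}"
--
--             if len(pending_tasks) < pending:
--                 summary += f"\n... and {pending - len(pending_tasks)} more pending tasks."
--
--     return summary
-- ===== SOURCE B (Python) =====
-- def format_task_summary(tasks: list) -> str:
--     if not tasks:
--         return "You don't have any tasks."
--     completed = 0
--     shown = []
--     for t in tasks:
--         s = t.get('status')
--         if s == 'completed':
--             completed += 1
--         elif s == 'pending' and len(shown) < 3:
--             shown.append("'%s'" % t.get('content', 'unnamed'))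
--     total = len(tasks)
--     pending = total - completed
--     summary = f"You have {total} tasks in total: {pending} pending and {completed} completed."
--     if shown:
--         summary += "\nPending: " + ", ".join(shown)
--         more = pending - len(shown)
--         if more > 0:
--             summary += f"\n... and {more} more pending tasks."
--     return summary
-- ===== Notes on version B (the rewrite author's own statement) =====
-- stated objective: simpler
-- what changed: Replaces A's three list passes (a completed-count comprehension, a pending filter with slice, and a join over a mapped comprehension) by a single loop that maintains a completed counter and the at-most-3 already-formatted pending strings, deriving pending and the '... and N more' count arithmetically.
import Mathlib
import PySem

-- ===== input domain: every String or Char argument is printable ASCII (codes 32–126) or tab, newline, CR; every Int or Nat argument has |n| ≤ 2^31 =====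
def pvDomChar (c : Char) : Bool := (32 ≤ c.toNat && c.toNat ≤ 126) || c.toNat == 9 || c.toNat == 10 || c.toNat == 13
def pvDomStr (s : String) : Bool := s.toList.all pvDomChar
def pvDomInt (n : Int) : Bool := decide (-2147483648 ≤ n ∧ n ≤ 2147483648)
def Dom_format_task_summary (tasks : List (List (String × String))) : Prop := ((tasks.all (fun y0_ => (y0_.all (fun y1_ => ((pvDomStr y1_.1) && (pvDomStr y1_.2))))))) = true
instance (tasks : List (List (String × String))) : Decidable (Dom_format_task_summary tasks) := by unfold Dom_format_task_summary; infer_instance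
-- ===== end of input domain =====

-- B is a single loop keeping a completed counter and the at-most-3 formatted pending strings, replacing A's three passes; same output, 'simpler' objective.

-- shared dict.get primitive: first match in the association list (Python dict.get)
def pyGet (d : List (String × String)) (k : String) : Option String :=
  (d.find? (fun p => p.1 == k)).map (·.2)

-- ===== PORT A =====
def format_task_summary (tasks : List (List (String × String))) : String :=
  if tasks = [] then "You don't have any tasks."
  else
    let total : Int := tasks.length
    let completed : Int := (tasks.filter (fun t => pyGet t "status" == some "completed")).length
    let pending : Int := total - completed
    let summary := "You have " ++ PySem.Int.toStr total ++ " tasks in total: " ++ PySem.Int.toStr pending ++ " pending and " ++ PySem.Int.toStr completed ++ " completed."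
    if pending > 0 then
      let pending_tasks := (tasks.filter (fun t => pyGet t "status" == some "pending")).take 3
      if pending_tasks ≠ [] then
        let task_list := PySem.Str.join ", " (pending_tasks.map (fun t => "'" ++ ((pyGet t "content").getD "unnamed") ++ "'"))
        let summary2 := summary ++ "\nPending: " ++ task_list
        if (pending_tasks.length : Int) < pending then
          summary2 ++ "\n... and " ++ PySem.Int.toStr (pending - pending_tasks.length) ++ " more pending tasks."
        else summary2
      else summary
    else summary

-- ===== PORT B =====
-- B-side helper: the body of B's single loop
def stepB (st : Int × List String) (t : List (String × String)) : Int × List String :=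
  let s := pyGet t "status"
  if s == some "completed" then (st.1 + 1, st.2)
  else if s == some "pending" && decide (st.2.length < 3) then
    (st.1, st.2 ++ ["'" ++ ((pyGet t "content").getD "unnamed") ++ "'"])
  else st

def format_task_summary_alt (tasks : List (List (String × String))) : String :=
  if tasks = [] then "You don't have any tasks."
  else
    let st := tasks.foldl stepB ((0 : Int), ([] : List String))
    let total : Int := tasks.length
    let pending : Int := total - st.1
    let summary := "You have " ++ PySem.Int.toStr total ++ " tasks in total: " ++ PySem.Int.toStr pending ++ " pending and " ++ PySem.Int.toStr st.1 ++ " completed."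
    if st.2 ≠ [] then
      let summary2 := summary ++ "\nPending: " ++ PySem.Str.join ", " st.2
      let more := pending - st.2.length
      if more > 0 then summary2 ++ "\n... and " ++ PySem.Int.toStr more ++ " more pending tasks."
      else summary2
    else summary

-- ===== PRECONDITION & SPEC =====
def Spec_format_task_summary (tasks : List (List (String × String))) (out : String) : Prop := out = format_task_summary_alt tasks
instance (tasks : List (List (String × String))) (out : String) : Decidable (Spec_format_task_summary tasks out) := by unfold Spec_format_task_summary; infer_instance

-- ===== CLAIM (what is proved, stated in full; the proofs are below) =====
def Claim_equal_format_task_summary : Prop := ∀ (tasks : List (List (String × String))), Dom_format_task_summary tasks → Spec_format_task_summary tasks (format_task_summary tasks)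

-- ===== LEMMAS AND PROOFS =====

def isCompleted (t : List (String × String)) : Bool := pyGet t "status" == some "completed"
def isPending (t : List (String × String)) : Bool := pyGet t "status" == some "pending"
def fmtTask (t : List (String × String)) : String := "'" ++ ((pyGet t "content").getD "unnamed") ++ "'"

-- loop invariant: B's fold computes the completed count and the first 3 formatted pending tasks
theorem fold_spec (tasks : List (List (String × String))) (c : Int) (sh : List String) (hsh : sh.length ≤ 3) :
    tasks.foldl stepB (c, sh)
    = (c + ((tasks.filter isCompleted).length : Int),
       sh ++ ((tasks.filter isPending).map fmtTask).take (3 - sh.length)) := by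
  induction tasks generalizing c sh with
  | nil => simp
  | cons t ts ih =>
    simp only [List.foldl_cons]
    by_cases h1 : pyGet t "status" == some "completed"
    · have hp : isPending t = false := by
        have := eq_of_beq h1
        simp [isPending, this]
      have hstep : stepB (c, sh) t = (c + 1, sh) := by simp [stepB, h1]
      rw [hstep, ih (c + 1) sh hsh]
      have hc : isCompleted t = true := h1
      simp [hc, hp]
      ring
    · by_cases h2 : pyGet t "status" == some "pending"
      · have hc : isCompleted t = false := by simpa [isCompleted] using h1
        have hp : isPending t = true := h2
        by_cases h3 : sh.length < 3
        · have hstep : stepB (c, sh) t = (c, sh ++ [fmtTask t]) := by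
            simp [stepB, h1, h2, h3, fmtTask]
          rw [hstep, ih c _ (by simp [fmtTask]; omega)]
          have h4 : 3 - sh.length = (3 - (sh.length + 1)) + 1 := by omega
          simp [hc, hp, fmtTask, h4, List.take_succ_cons, List.length_append]
        · have h3' : sh.length = 3 := by omega
          have hstep : stepB (c, sh) t = (c, sh) := by simp [stepB, h1, h2, h3]
          rw [hstep, ih c sh hsh]
          simp [hc, hp, h3']
      · have hc : isCompleted t = false := by simpa [isCompleted] using h1
        have hp : isPending t = false := by simpa [isPending] using h2
        have hstep : stepB (c, sh) t = (c, sh) := by simp [stepB, h1, h2]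
        rw [hstep, ih c sh hsh]
        simp [hc, hp]

theorem count_add_le (tasks : List (List (String × String))) :
    (tasks.filter isCompleted).length + (tasks.filter isPending).length ≤ tasks.length := by
  induction tasks with
  | nil => simp
  | cons t ts ih =>
    by_cases hc : isCompleted t
    · have hp : isPending t = false := by
        have := eq_of_beq hc
        simp [isPending, this]
      simp [hc, hp]
      omega
    · by_cases hp : isPending t <;>
        simp [hc, hp] <;> omega

-- ===== VERDICT (by name: the statement is the Claim_ definition above) =====
theorem format_task_summary_spec : Claim_equal_format_task_summary := by
  intro tasks _
  unfold Spec_format_task_summary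
  by_cases hnil : tasks = []
  · simp [format_task_summary, format_task_summary_alt, hnil]
  · simp only [format_task_summary, format_task_summary_alt, if_neg hnil]
    rw [fold_spec tasks 0 [] (by simp)]
    simp only [List.nil_append, zero_add]
    rw [show (fun t : List (String × String) => pyGet t "status" == some "completed") = isCompleted from rfl,
        show (fun t : List (String × String) => pyGet t "status" == some "pending") = isPending from rfl,
        show (fun t : List (String × String) => "'" ++ (pyGet t "content").getD "unnamed" ++ "'") = fmtTask from rfl]
    simp only [List.length_nil, Nat.sub_zero, ← List.map_take]
    have hle := count_add_le tasks
    by_cases hpp : List.filter isPending tasks = []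
    · simp [hpp]
    · have h1 : List.take 3 (List.filter isPending tasks) ≠ [] := by
        simp [List.take_eq_nil_iff, hpp]
      have hlen : 1 ≤ (List.filter isPending tasks).length := by
        exact Nat.one_le_iff_ne_zero.mpr (by simpa using hpp)
      have hpend : ((tasks.length : ℤ) - (List.filter isCompleted tasks).length) > 0 := by omega
      have hm : List.map fmtTask (List.take 3 (List.filter isPending tasks)) ≠ [] := by
        simpa using h1
      rw [if_pos hpend, if_pos h1, if_pos hm]
      simp only [List.length_map]
      by_cases hlt : ((List.take 3 (List.filter isPending tasks)).length : ℤ) < (tasks.length : ℤ) - (List.filter isCompleted tasks).length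
      · rw [if_pos hlt, if_pos (by omega)]
      · rw [if_neg hlt, if_neg (by omega)]
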